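-- pv_equiv track=rewrite | github.com/pcphantom/sandbox_rpg | core/enhancement.py | get_base_item_id
-- ===== SOURCE A (Python) =====
-- from typing import Dict, Tuple
--
-- WEAPON_BASES: Dict[str, Tuple[int, int]] = {
--     'iron_sword': (30, 0),
--     'iron_axe':   (22, 4),
--     'mace':       (26, 0),
-- }
--
-- RANGED_BASES: Dict[str, int] = {
--     'bow':      18,
--     'crossbow': 28,
--     'sling':    12,
-- }
--
-- ARMOR_BASES: Dict[str, int] = {
--     'iron_armor':  6,
--     'iron_shield': 4,
-- }
--
-- def get_base_item_id(item_id: str) -> str: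
--     """Strip enhancement suffix (_1.._5) to get base item id.
--
--     Returns *item_id* unchanged if it is not an enhanced variant.
--     """
--     for base_id in WEAPON_BASES:
--         if item_id.startswith(base_id + '_') and item_id[len(base_id) + 1:].isdigit():
--             return base_id
--     for base_id in RANGED_BASES:
--         if item_id.startswith(base_id + '_') and item_id[len(base_id) + 1:].isdigit():
--             return base_id
--     for base_id in ARMOR_BASES:
--         if item_id.startswith(base_id + '_') and item_id[len(base_id) + 1:].isdigit():
--             return base_id
--     if item_id.startswith('turret_') and item_id[len('turret_'):].isdigit():
--         return 'turret'
--     return item_id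
-- ===== SOURCE B (Python) =====
-- # Single parse: split at the last '_' and test the pieces, instead of scanning every base id.
-- # Base-id set = WEAPON_BASES | RANGED_BASES | ARMOR_BASES keys plus 'turret' (the module's constants).
-- BASE_IDS = frozenset({
--     'iron_sword', 'iron_axe', 'mace',
--     'bow', 'crossbow', 'sling',
--     'iron_armor', 'iron_shield',
--     'turret',
-- })
--
-- def get_base_item_id(item_id: str) -> str:
--     base, sep, suffix = item_id.rpartition('_')
--     if sep and suffix.isdigit() and base in BASE_IDS:
--         return base
--     return item_id
-- ===== Notes on version B (the rewrite author's own statement) =====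
-- stated objective: simpler
-- what changed: Replaces the per-base startswith+slice scans over three dicts with a single rpartition at the last underscore followed by one digit test and one membership test in a precomputed set of all base ids.
import Mathlib
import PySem

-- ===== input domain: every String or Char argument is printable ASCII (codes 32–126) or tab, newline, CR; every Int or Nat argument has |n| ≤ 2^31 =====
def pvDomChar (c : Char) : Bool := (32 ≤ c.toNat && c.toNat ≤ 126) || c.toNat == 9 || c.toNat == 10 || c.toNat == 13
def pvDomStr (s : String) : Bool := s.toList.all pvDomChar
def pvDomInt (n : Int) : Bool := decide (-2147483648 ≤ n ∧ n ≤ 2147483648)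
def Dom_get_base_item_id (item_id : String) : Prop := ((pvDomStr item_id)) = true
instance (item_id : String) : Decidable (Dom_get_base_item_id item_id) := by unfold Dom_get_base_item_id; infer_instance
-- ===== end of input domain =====

-- B replaces A's per-base startswith scan over three dicts by one split at the last underscore
-- plus a single membership test in the combined base-id set (objective: simpler).

-- ===== PORT A =====
-- keys of WEAPON_BASES / RANGED_BASES / ARMOR_BASES, in dict order
def pvWeaponKeys : List (List Char) := ["iron_sword".toList, "iron_axe".toList, "mace".toList]
def pvRangedKeys : List (List Char) := ["bow".toList, "crossbow".toList, "sling".toList]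
def pvArmorKeys : List (List Char) := ["iron_armor".toList, "iron_shield".toList]

-- item_id.startswith(base_id + '_') and item_id[len(base_id) + 1:].isdigit()
def pvChk (base : List Char) (s : List Char) : Bool :=
  PySem.Chars.startswith s (base ++ ['_']) &&
    PySem.Chars.strIsdigit (PySem.List.slice s (some ((base.length : Int) + 1)) none)

-- one 'for base_id in …: if …: return base_id' loop
def pvLoop (keys : List (List Char)) (s : List Char) : Option (List Char) :=
  match keys with
  | [] => none
  | b :: rest => if pvChk b s then some b else pvLoop rest s

def get_base_item_id (item_id : String) : String :=
  match pvLoop pvWeaponKeys item_id.toList with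
  | some b => String.ofList b
  | none =>
    match pvLoop pvRangedKeys item_id.toList with
    | some b => String.ofList b
    | none =>
      match pvLoop pvArmorKeys item_id.toList with
      | some b => String.ofList b
      | none =>
        if pvChk "turret".toList item_id.toList then "turret" else item_id

-- ===== PORT B =====
-- the combined BASE_IDS set (distinct literals)
def pvBaseIds : List (List Char) :=
  ["iron_sword".toList, "iron_axe".toList, "mace".toList,
   "bow".toList, "crossbow".toList, "sling".toList,
   "iron_armor".toList, "iron_shield".toList, "turret".toList]

-- item_id.rpartition('_'): split at the last underscore; none ↔ the string has no underscore
-- (exact hand port: scan from the right for the first underscore)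
def pvNotU (c : Char) : Bool := c ≠ '_'

def pvRPartUnderscore (s : List Char) : Option (List Char × List Char) :=
  match s.reverse.dropWhile pvNotU with
  | [] => none
  | _ :: rest => some (rest.reverse, (s.reverse.takeWhile pvNotU).reverse)

def get_base_item_id_alt (item_id : String) : String :=
  match pvRPartUnderscore item_id.toList with
  | none => item_id
  | some (base, suffix) =>
    if PySem.Chars.strIsdigit suffix && pvBaseIds.contains base then String.ofList base
    else item_id

-- ===== PRECONDITION & SPEC =====
def Spec_get_base_item_id (item_id : String) (out : String) : Prop := out = get_base_item_id_alt item_id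
instance (item_id : String) (out : String) : Decidable (Spec_get_base_item_id item_id out) := by unfold Spec_get_base_item_id; infer_instance

-- ===== CLAIM (what is proved, stated in full; the proofs are below) =====
def Claim_equal_get_base_item_id : Prop := ∀ (item_id : String), Dom_get_base_item_id item_id → Spec_get_base_item_id item_id (get_base_item_id item_id)

-- ===== LEMMAS AND PROOFS =====

-- a digit character is not '_'
theorem pv_digit_ne_underscore {c : Char} (h : PySem.Chars.isdigit c = true) : c ≠ '_' := by
  intro he; subst he; simp [PySem.Chars.isdigit] at h

-- characterisation of A's per-base check via the split at the last '_'
theorem pvChk_iff (b s : List Char) :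
    pvChk b s = true ↔
      (PySem.Chars.strIsdigit ((s.reverse.takeWhile pvNotU).reverse) = true ∧
       s.reverse.dropWhile pvNotU = '_' :: b.reverse) := by
  constructor
  · intro hchk
    have h1 : PySem.Chars.startswith s (b ++ ['_']) = true := by
      simp [pvChk, Bool.and_eq_true] at hchk; exact hchk.1
    have h2 : PySem.Chars.strIsdigit (PySem.List.slice s (some ((b.length : Int) + 1)) none) = true := by
      simp [pvChk, Bool.and_eq_true] at hchk; exact hchk.2
    obtain ⟨t, ht⟩ := (PySem.Chars.startswith_iff s (b ++ ['_'])).1 h1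
    have hst : s = b ++ '_' :: t := by simpa using ht.symm
    have hdrop : PySem.List.slice s (some ((b.length : Int) + 1)) none = t := by
      rw [PySem.List.slice_from s (by omega), hst]
      have : ((b.length : Int) + 1).toNat = (b ++ ['_']).length := by simp
      rw [this, show b ++ '_' :: t = (b ++ ['_']) ++ t by simp, List.drop_left]
    rw [hdrop] at h2
    have hall : ∀ c ∈ t.reverse, pvNotU c = true := by
      intro c hc
      simp only [List.mem_reverse] at hc
      have hd : PySem.Chars.isdigit c = true := by
        simp [PySem.Chars.strIsdigit, Bool.and_eq_true, List.all_eq_true] at h2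
        exact h2.2 c hc
      simpa [pvNotU] using pv_digit_ne_underscore hd
    have hrev : s.reverse = t.reverse ++ '_' :: b.reverse := by
      rw [hst]; simp
    constructor
    · rw [hrev, List.takeWhile_append_of_pos hall]
      simpa using h2
    · rw [hrev, List.dropWhile_append_of_pos hall]
      simp [List.dropWhile, pvNotU]
  · rintro ⟨hdig, hdrop⟩
    set t := s.reverse.takeWhile pvNotU with htdef
    have hsplit : t ++ '_' :: b.reverse = s.reverse := by
      rw [htdef, ← hdrop]; exact List.takeWhile_append_dropWhile
    have hst : s = b ++ '_' :: t.reverse := by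
      have := congrArg List.reverse hsplit
      simpa using this.symm
    have h1 : PySem.Chars.startswith s (b ++ ['_']) = true := by
      rw [PySem.Chars.startswith_iff, hst]
      exact ⟨t.reverse, by simp⟩
    have hdrop2 : PySem.List.slice s (some ((b.length : Int) + 1)) none = t.reverse := by
      rw [PySem.List.slice_from s (by omega), hst]
      have : ((b.length : Int) + 1).toNat = (b ++ ['_']).length := by simp
      rw [this, show b ++ '_' :: t.reverse = (b ++ ['_']) ++ t.reverse by simp, List.drop_left]
    simp [pvChk, h1, hdrop2, hdig]

-- when no base matches, the loop returns none
theorem pvLoop_none (keys : List (List Char)) (s : List Char)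
    (h : ∀ b, pvChk b s = false) : pvLoop keys s = none := by
  induction keys with
  | nil => rfl
  | cons k rest ih => simp [pvLoop, h k, ih]

-- the loop finds exactly the base determined by the split
theorem pvLoop_eq (keys : List (List Char)) (s base : List Char)
    (h : ∀ b, pvChk b s = true ↔ b = base) :
    pvLoop keys s = if keys.contains base then some base else none := by
  induction keys with
  | nil => simp [pvLoop]
  | cons k rest ih =>
    by_cases hk : pvChk k s = true
    · have : k = base := (h k).1 hk
      subst this
      simp [pvLoop, hk]
    · have hne : k ≠ base := fun he => hk ((h k).2 he)
      simp [pvLoop, hk, ih, Ne.symm hne]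

-- ===== VERDICT (by name: the statement is the Claim_ definition above) =====
theorem get_base_item_id_spec : Claim_equal_get_base_item_id := by
  intro item_id _
  unfold Spec_get_base_item_id get_base_item_id get_base_item_id_alt pvRPartUnderscore
  cases h : item_id.toList.reverse.dropWhile pvNotU with
  | nil =>
    have hfalse : ∀ b, pvChk b item_id.toList = false := by
      intro b
      rcases hx : pvChk b item_id.toList with _ | _
      · rfl
      · have h2 := ((pvChk_iff b item_id.toList).1 hx).2
        rw [h] at h2; simp at h2
    simp [pvLoop_none _ _ hfalse, hfalse]
  | cons c rest =>
    have hc : c = '_' := by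
      have h2 : pvNotU c = false := by
        have hne : item_id.toList.reverse.dropWhile pvNotU ≠ [] := by
          rw [h]; exact List.cons_ne_nil _ _
        have h3 := List.head_dropWhile_not (p := pvNotU) hne
        have h4 : (item_id.toList.reverse.dropWhile pvNotU).head hne = c := by
          simp [h]
        rwa [h4] at h3
      simpa [pvNotU] using h2
    subst hc
    have hiff : ∀ b, pvChk b item_id.toList = true ↔
        (PySem.Chars.strIsdigit ((item_id.toList.reverse.takeWhile pvNotU).reverse) = true ∧
         b = rest.reverse) := by
      intro b
      rw [pvChk_iff, h]
      constructor
      · rintro ⟨hd, he⟩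
        refine ⟨hd, ?_⟩
        have : rest = b.reverse := by injection he
        simp [this]
      · rintro ⟨hd, he⟩
        subst he
        exact ⟨hd, by rw [List.reverse_reverse]⟩
    by_cases hdig : PySem.Chars.strIsdigit ((item_id.toList.reverse.takeWhile pvNotU).reverse) = true
    · have hiff2 : ∀ b, pvChk b item_id.toList = true ↔ b = rest.reverse := by
        intro b; rw [hiff b]; simp [hdig]
      rw [pvLoop_eq pvWeaponKeys _ _ hiff2, pvLoop_eq pvRangedKeys _ _ hiff2,
          pvLoop_eq pvArmorKeys _ _ hiff2]
      simp only [hdig, Bool.true_and]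
      by_cases hB : rest.reverse ∈ pvBaseIds
      · by_cases c1 : rest.reverse ∈ pvWeaponKeys
        · simp [c1, hB]
        · by_cases c2 : rest.reverse ∈ pvRangedKeys
          · simp [c1, c2, hB]
          · by_cases c3 : rest.reverse ∈ pvArmorKeys
            · simp [c1, c2, c3, hB]
            · have hr : rest = ['t', 'e', 'r', 'r', 'u', 't'] := by
                simp [pvBaseIds] at hB
                simp [pvWeaponKeys] at c1
                simp [pvRangedKeys] at c2
                simp [pvArmorKeys] at c3
                tauto
              subst hr
              have hT : pvChk ['t', 'u', 'r', 'r', 'e', 't'] item_id.toList = true :=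
                (hiff2 _).2 (by decide)
              simp [hT, pvWeaponKeys, pvRangedKeys, pvArmorKeys, pvBaseIds]
      · have c1 : rest.reverse ∉ pvWeaponKeys := by
          simp [pvBaseIds] at hB; simp [pvWeaponKeys]; tauto
        have c2 : rest.reverse ∉ pvRangedKeys := by
          simp [pvBaseIds] at hB; simp [pvRangedKeys]; tauto
        have c3 : rest.reverse ∉ pvArmorKeys := by
          simp [pvBaseIds] at hB; simp [pvArmorKeys]; tauto
        have hT : pvChk ['t', 'u', 'r', 'r', 'e', 't'] item_id.toList = false := by
          rcases hx : pvChk ['t', 'u', 'r', 'r', 'e', 't'] item_id.toList with _ | _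
          · rfl
          · have := (hiff2 _).1 hx
            rw [← this] at hB
            exact absurd (by decide : ("turret".toList : List Char) ∈ pvBaseIds) hB
        simp [c1, c2, c3, hT, hB]
    · have hfalse : ∀ b, pvChk b item_id.toList = false := by
        intro b
        rcases hx : pvChk b item_id.toList with _ | _
        · rfl
        · exact absurd ((hiff b).1 hx).1 hdig
      have hdig' : PySem.Chars.strIsdigit ((item_id.toList.reverse.takeWhile pvNotU).reverse) = false := by
        rcases hx : PySem.Chars.strIsdigit ((item_id.toList.reverse.takeWhile pvNotU).reverse) with _ | _
        · rfl
        · exact absurd hx hdig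
      simp [pvLoop_none _ _ hfalse, hfalse, hdig']
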